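-- pv_equiv track=rewrite | github.com/rschaeff/pyECOD | ecod/pipelines/domain_analysis/summary/processors/hhsearch.py | _calculate_range
-- ===== SOURCE A (Python) =====
-- def _calculate_range(alignment: str, start_pos: int) -> str:
--     """
--     Calculate range from alignment string.
--
--     Args:
--         alignment: Alignment string (with gaps)
--         start_pos: Starting position
--
--     Returns:
--         Range string in format "start-end,start-end,..."
--     """
--     ranges = []
--     current_range_start = None
--     current_pos = start_pos
--
--     for char in alignment:
--         if char != '-':  # Not a gap
--             if current_range_start is None:
--                 current_range_start = current_pos
--             current_pos += 1
--         else:  # Gap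
--             if current_range_start is not None:
--                 ranges.append(f"{current_range_start}-{current_pos-1}")
--                 current_range_start = None
--
--     # Add the last range if exists
--     if current_range_start is not None:
--         ranges.append(f"{current_range_start}-{current_pos-1}")
--
--     return ",".join(ranges)
-- ===== SOURCE B (Python) =====
-- def _calculate_range(alignment: str, start_pos: int) -> str:
--     """Split the alignment into gap-separated fragments; each non-empty
--     fragment of length L occupies positions pos .. pos+L-1."""
--     ranges = []
--     pos = start_pos
--     for run in alignment.split('-'):
--         if run:
--             ranges.append(f"{pos}-{pos + len(run) - 1}")
--             pos += len(run)
--     return ",".join(ranges)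
-- ===== Notes on version B (the rewrite author's own statement) =====
-- stated objective: simpler
-- what changed: Replaces the char-by-char state machine (optional current_range_start toggled per character) with a two-pass structure: split the alignment on '-' into runs, then emit one range per non-empty run while advancing a position counter by the run length; the per-character Python loop is replaced by C-level str.split, a constant-factor win.
import Mathlib
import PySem

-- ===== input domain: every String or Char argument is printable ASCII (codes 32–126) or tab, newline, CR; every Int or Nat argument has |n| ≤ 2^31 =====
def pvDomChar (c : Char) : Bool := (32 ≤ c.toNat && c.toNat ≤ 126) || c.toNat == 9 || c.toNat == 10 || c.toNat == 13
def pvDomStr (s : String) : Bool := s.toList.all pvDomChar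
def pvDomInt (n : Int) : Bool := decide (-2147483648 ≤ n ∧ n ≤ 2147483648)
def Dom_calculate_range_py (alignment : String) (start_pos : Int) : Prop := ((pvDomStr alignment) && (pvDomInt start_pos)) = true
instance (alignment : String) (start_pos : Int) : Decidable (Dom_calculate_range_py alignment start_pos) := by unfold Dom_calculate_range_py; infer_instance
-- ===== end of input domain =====

-- B replaces A's per-character state machine by split-on-'-' into runs plus a
-- position counter advanced per run (objective: simpler decomposition).

-- ===== PORT A =====
-- f"{a}-{b}"
def fmtRange (a b : Int) : String := PySem.Int.toStr a ++ "-" ++ PySem.Int.toStr b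

-- one iteration of A's for-loop over a character; state = (ranges, current_range_start, current_pos)
def stepA : (List String × Option Int × Int) → Char → (List String × Option Int × Int)
  | (ranges, cur, pos), c =>
    if c ≠ '-' then
      match cur with
      | none => (ranges, some pos, pos + 1)
      | some s => (ranges, some s, pos + 1)
    else
      match cur with
      | some s => (ranges ++ [fmtRange s (pos - 1)], none, pos)
      | none => (ranges, none, pos)

-- "add the last range if exists"
def finA : (List String × Option Int × Int) → List String
  | (ranges, cur, pos) =>
    match cur with
    | some s => ranges ++ [fmtRange s (pos - 1)]
    | none => ranges

def calculate_range_py (alignment : String) (start_pos : Int) : String :=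
  let t := alignment.toList.foldl stepA ([], none, start_pos)
  PySem.Str.join "," (finA t)

-- ===== PORT B =====
-- one iteration of B's for-loop over a run; state = (ranges, pos)
def stepB : (List String × Int) → List Char → (List String × Int)
  | (ranges, pos), run =>
    if run ≠ [] then
      (ranges ++ [fmtRange pos (pos + (run.length : Int) - 1)], pos + (run.length : Int))
    else (ranges, pos)

def calculate_range_py_alt (alignment : String) (start_pos : Int) : String :=
  -- alignment.split('-') ported via PySem.Chars.splitOn on the code points
  let t := (PySem.Chars.splitOn alignment.toList ['-']).foldl stepB ([], start_pos)
  PySem.Str.join "," t.1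

-- ===== PRECONDITION & SPEC =====
def Spec_calculate_range_py (alignment : String) (start_pos : Int) (out : String) : Prop := out = calculate_range_py_alt alignment start_pos
instance (alignment : String) (start_pos : Int) (out : String) : Decidable (Spec_calculate_range_py alignment start_pos out) := by unfold Spec_calculate_range_py; infer_instance

-- ===== CLAIM (what is proved, stated in full; the proofs are below) =====
def Claim_equal_calculate_range_py : Prop := ∀ (alignment : String) (start_pos : Int), Dom_calculate_range_py alignment start_pos → Spec_calculate_range_py alignment start_pos (calculate_range_py alignment start_pos)

-- ===== LEMMAS AND PROOFS =====

-- clean recursion equal to Python's split('-') on code points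
def glueRun (p : List Char) : List (List Char) → List (List Char)
  | [] => [p]
  | q :: qs => (p ++ q) :: qs

def pySplit : List Char → List (List Char)
  | [] => [[]]
  | c :: cs => if c = '-' then [] :: pySplit cs else glueRun [c] (pySplit cs)

theorem pySplit_ne_nil (cs : List Char) : pySplit cs ≠ [] := by
  cases cs with
  | nil => simp [pySplit]
  | cons c cs =>
    simp only [pySplit]
    split
    · simp
    · cases h : pySplit cs <;> simp [glueRun]

theorem glueRun_glueRun (p q : List Char) (l : List (List Char)) :
    glueRun p (glueRun q l) = glueRun (p ++ q) l := by
  cases l <;> simp [glueRun]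

theorem glueRun_nil_of_ne_nil (l : List (List Char)) (h : l ≠ []) : glueRun [] l = l := by
  cases l with
  | nil => exact absurd rfl h
  | cons q qs => simp [glueRun]

theorem splitOn_go_char (fuel : Nat) : ∀ (l cur : List Char) (acc : List (List Char)),
    l.length ≤ fuel →
    PySem.Chars.splitOn.go ['-'] fuel l cur acc = acc.reverse ++ glueRun cur.reverse (pySplit l) := by
  induction fuel with
  | zero =>
    intro l cur acc h
    have : l = [] := List.length_eq_zero_iff.mp (Nat.le_zero.mp h)
    subst this
    simp [PySem.Chars.splitOn.go, pySplit, glueRun]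
  | succ n ih =>
    intro l cur acc h
    cases l with
    | nil => simp [PySem.Chars.splitOn.go, pySplit, glueRun]
    | cons c rest =>
      by_cases hc : c = '-'
      · subst hc
        have hpre : List.isPrefixOf ['-'] ('-' :: rest) = true := by
          simp [List.isPrefixOf]
        rw [PySem.Chars.splitOn.go]
        simp only [hpre, if_true, List.length_cons, List.length_nil, Nat.zero_add,
          List.drop_succ_cons, List.drop_zero]
        rw [ih rest [] (cur.reverse :: acc) (by simpa using Nat.le_of_succ_le_succ h)]
        cases hps : pySplit rest with
        | nil => exact absurd hps (pySplit_ne_nil rest)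
        | cons q qs => simp [pySplit, glueRun, hps]
      · have hpre : List.isPrefixOf ['-'] (c :: rest) = false := by
          simp [List.isPrefixOf]
          exact fun hh => hc hh.symm
        rw [PySem.Chars.splitOn.go]
        simp only [hpre, Bool.false_eq_true, if_false]
        rw [ih rest (c :: cur) acc (by simpa using Nat.le_of_succ_le_succ h)]
        simp [pySplit, hc, glueRun_glueRun]

theorem splitOn_char (l : List Char) : PySem.Chars.splitOn l ['-'] = pySplit l := by
  unfold PySem.Chars.splitOn
  rw [splitOn_go_char (l.length + 1) l [] [] (by omega)]
  simp [glueRun_nil_of_ne_nil _ (pySplit_ne_nil l)]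

-- the list of ranges A's loop (plus the trailing flush) produces from state (st, pos)
def aGo : List Char → Option Int → Int → List String
  | [], none, _ => []
  | [], some s, pos => [fmtRange s (pos - 1)]
  | c :: cs, st, pos =>
    if c ≠ '-' then aGo cs (some (st.getD pos)) (pos + 1)
    else
      match st with
      | none => aGo cs none pos
      | some s => fmtRange s (pos - 1) :: aGo cs none pos

-- the list of ranges B's loop produces from the runs
def bGo : List (List Char) → Int → List String
  | [], _ => []
  | r :: rs, pos =>
    if r ≠ [] then fmtRange pos (pos + (r.length : Int) - 1) :: bGo rs (pos + (r.length : Int))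
    else bGo rs pos

theorem foldA (cs : List Char) : ∀ (r : List String) (st : Option Int) (p : Int),
    finA (cs.foldl stepA (r, st, p)) = r ++ aGo cs st p := by
  induction cs with
  | nil => intro r st p; cases st <;> simp [finA, aGo]
  | cons c cs ih =>
    intro r st p
    by_cases hc : c = '-'
    · subst hc
      cases st with
      | none => simpa [stepA, aGo] using ih r none p
      | some s => simpa [stepA, aGo] using ih (r ++ [fmtRange s (p - 1)]) none p
    · cases st with
      | none => simpa [stepA, hc, aGo] using ih r (some p) (p + 1)
      | some s => simpa [stepA, hc, aGo] using ih r (some s) (p + 1)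

theorem foldB (rs : List (List Char)) : ∀ (acc : List String) (p : Int),
    (rs.foldl stepB (acc, p)).1 = acc ++ bGo rs p := by
  induction rs with
  | nil => intro acc p; simp [bGo]
  | cons r rs ih =>
    intro acc p
    by_cases hr : r = []
    · subst hr; simpa [stepB, bGo] using ih acc p
    · simpa [stepB, hr, bGo] using ih (acc ++ [fmtRange p (p + (r.length : Int) - 1)]) (p + (r.length : Int))

theorem aGo_eq_bGo (cs : List Char) : ∀ (p : Int),
    (aGo cs none p = bGo (pySplit cs) p) ∧
    (∀ (s : Int) (r : List Char) (rs : List (List Char)), pySplit cs = r :: rs →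
      aGo cs (some s) p = fmtRange s (p - 1 + (r.length : Int)) :: bGo rs (p + (r.length : Int))) := by
  induction cs with
  | nil =>
    intro p
    constructor
    · simp [aGo, pySplit, bGo]
    · intro s r rs h
      simp [pySplit] at h
      obtain ⟨hr, hrs⟩ := h
      subst hr; subst hrs
      simp [aGo, bGo]
  | cons c cs ih =>
    intro p
    obtain ⟨r', rs', hsp⟩ := List.exists_cons_of_ne_nil (pySplit_ne_nil cs)
    by_cases hc : c = '-'
    · subst hc
      constructor
      · simpa [aGo, pySplit, bGo] using (ih p).1
      · intro s r rs h
        simp [pySplit] at h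
        obtain ⟨hr, hrs⟩ := h
        subst hr; subst hrs
        simpa [aGo, bGo] using (ih p).1
    · have hps : pySplit (c :: cs) = (c :: r') :: rs' := by
        simp [pySplit, hc, hsp, glueRun]
      constructor
      · rw [hps]
        have := (ih (p + 1)).2 p r' rs' hsp
        simp only [aGo, hc, ne_eq, not_false_iff, if_true, Option.getD_none]
        rw [this]
        have hne : (c :: r' : List Char) ≠ [] := by simp
        simp only [bGo, hne, ne_eq, not_false_iff, if_true]
        congr 1
        · congr 1
          push_cast [List.length_cons]
          ring
        · congr 1
          push_cast [List.length_cons]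
          ring
      · intro s r rs h
        rw [hps] at h
        injection h with hr hrs
        subst hr; subst hrs
        simp only [aGo, hc, ne_eq, not_false_iff, if_true, Option.getD_some]
        rw [(ih (p + 1)).2 s r' rs' hsp]
        congr 1
        · congr 1
          push_cast [List.length_cons]
          ring
        · congr 1
          push_cast [List.length_cons]
          ring

theorem calculate_range_py_spec : Claim_equal_calculate_range_py := by
  intro alignment start_pos _
  unfold Spec_calculate_range_py calculate_range_py calculate_range_py_alt
  simp only []
  rw [foldA alignment.toList [] none start_pos,
      foldB (PySem.Chars.splitOn alignment.toList ['-']) [] start_pos,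
      splitOn_char, (aGo_eq_bGo alignment.toList start_pos).1]
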